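-- pv_equiv track=rewrite | github.com/AllGoodNamesAreTaken2/AoC-2020 | 14_new.py | make_sub_masks
-- ===== SOURCE A (Python) =====
-- def replace_first_x(mask):
--     mask_a = mask.replace('X', '0', 1)
--     mask_b = mask.replace('X', '1', 1)
--     return mask_a, mask_b
--
-- def make_sub_masks(mask):
--     dirty_mask = [mask]
--     clean_mask = []
--
--     while len(dirty_mask) > 0:
--         mask_to_clean = dirty_mask.pop()
--         a_mask, b_mask = replace_first_x(mask_to_clean)
--         if 'X' in a_mask:
--             dirty_mask.append(a_mask)
--             dirty_mask.append(b_mask)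
--         else:
--             clean_mask.append(a_mask)
--             clean_mask.append(b_mask)
--
--     return clean_mask
-- ===== SOURCE B (Python) =====
-- def replace_first_x(mask):
--     mask_a = mask.replace('X', '0', 1)
--     mask_b = mask.replace('X', '1', 1)
--     return mask_a, mask_b
--
-- def make_sub_masks(mask):
--     a, b = replace_first_x(mask)
--     if 'X' in a:
--         return make_sub_masks(b) + make_sub_masks(a)
--     return [a, b]
-- ===== Notes on version B (the rewrite author's own statement) =====
-- stated objective: simpler
-- what changed: Replaced the explicit worklist (stack) loop with accumulator lists by a direct recursion over the substitution tree: recurse on the second substituted mask, then the first, and concatenate, which reproduces the stack's LIFO emission order without any mutable state.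
import Mathlib
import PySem

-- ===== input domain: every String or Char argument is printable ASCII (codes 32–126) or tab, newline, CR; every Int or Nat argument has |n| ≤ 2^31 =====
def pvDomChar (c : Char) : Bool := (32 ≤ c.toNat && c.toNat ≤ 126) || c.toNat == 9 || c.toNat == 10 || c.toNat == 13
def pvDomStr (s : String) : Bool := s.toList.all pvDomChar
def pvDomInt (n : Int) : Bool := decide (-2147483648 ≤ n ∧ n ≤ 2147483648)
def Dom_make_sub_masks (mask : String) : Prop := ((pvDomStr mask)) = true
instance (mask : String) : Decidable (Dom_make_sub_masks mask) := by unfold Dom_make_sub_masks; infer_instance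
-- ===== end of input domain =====

-- B replaces A's explicit stack loop by a direct recursion over the substitution tree (same result, same order).

-- shared primitive: s.replace(old, new, 1) for single-character old/new — exact: replaces the
-- first occurrence of the character `old` (here 'X'), leaving the rest of the string unchanged.
def repFirst : List Char → Char → Char → List Char
  | [], _, _ => []
  | c :: rest, old, new => if c = old then new :: rest else c :: repFirst rest old new

-- count of 'X' after replacing the first 'X' (used for termination of both ports)
theorem count_repFirst_of_mem (l : List Char) (d : Char) (hd : d ≠ 'X')
    (h : 'X' ∈ l) : (repFirst l 'X' d).count 'X' = l.count 'X' - 1 := by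
  induction l with
  | nil => cases h
  | cons c rest ih =>
    by_cases hc : c = 'X'
    · subst hc
      simp [repFirst, hd]
    · have hr : 'X' ∈ rest := by
        rcases List.mem_cons.mp h with h' | h'
        · exact absurd h'.symm hc
        · exact h'
      have hp : 0 < rest.count 'X' := List.count_pos_iff.mpr hr
      simp [repFirst, hc, ih hr]

theorem repFirst_of_not_mem (l : List Char) (d : Char) (h : 'X' ∉ l) :
    repFirst l 'X' d = l := by
  induction l with
  | nil => rfl
  | cons c rest ih =>
    simp at h
    have hc : ¬ c = 'X' := fun e => h.1 e.symm
    simp [repFirst, hc, ih h.2]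

theorem mem_of_contains_repFirst (l : List Char) (d : Char)
    (h : (repFirst l 'X' d).contains 'X' = true) : 'X' ∈ l := by
  by_contra hl
  rw [repFirst_of_not_mem l d hl] at h
  exact hl (List.contains_iff_mem.mp h)

-- ===== PORT A =====
-- the while-loop over the dirty stack; the stack's top is the list head (append = cons, pop = head)
def msmLoopA (dirty : List (List Char)) (clean : List (List Char)) : List (List Char) :=
  match dirty with
  | [] => clean
  | m :: rest =>
    let a := repFirst m 'X' '0'   -- replace_first_x
    let b := repFirst m 'X' '1'
    if a.contains 'X'             -- 'X' in a_mask ('X' is a single char, so substring test = membership)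
    then msmLoopA (b :: a :: rest) clean
    else msmLoopA rest (clean ++ [a, b])
termination_by (dirty.map (fun m => 3 ^ m.count 'X')).sum
decreasing_by
  · simp only [List.map_cons, List.sum_cons]
    have hm : 'X' ∈ m := mem_of_contains_repFirst m '0' (by assumption)
    have h0 := count_repFirst_of_mem m '0' (by decide) hm
    have h1 := count_repFirst_of_mem m '1' (by decide) hm
    have hc : 1 ≤ m.count 'X' := List.count_pos_iff.mpr hm
    rw [h0, h1]
    have : (3:ℕ) ^ (m.count 'X' - 1) + 3 ^ (m.count 'X' - 1) < 3 ^ m.count 'X' := by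
      have : (3:ℕ) ^ (m.count 'X' - 1) * 3 ≤ 3 ^ m.count 'X' := by
        rw [← pow_succ]
        exact Nat.pow_le_pow_right (by norm_num) (by omega)
      have hp : 0 < (3:ℕ) ^ (m.count 'X' - 1) := Nat.pow_pos (by norm_num : 0 < 3)
      omega
    omega
  · simp only [List.map_cons, List.sum_cons]
    have hp : 0 < (3:ℕ) ^ (m.count 'X') := Nat.pow_pos (by norm_num : 0 < 3)
    omega

def make_sub_masks (mask : String) : List String :=
  (msmLoopA [mask.toList] []).map String.ofList

-- ===== PORT B =====
-- direct recursion on the substitution tree (second substituted mask first, matching the stack's pop order)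
def msmB (l : List Char) : List (List Char) :=
  let a := repFirst l 'X' '0'
  let b := repFirst l 'X' '1'
  if a.contains 'X'
  then msmB b ++ msmB a
  else [a, b]
termination_by l.count 'X'
decreasing_by
  · have hm : 'X' ∈ l := mem_of_contains_repFirst l '0' (by assumption)
    have h1 := count_repFirst_of_mem l '1' (by decide) hm
    have hc : 1 ≤ l.count 'X' := List.count_pos_iff.mpr hm
    omega
  · have hm : 'X' ∈ l := mem_of_contains_repFirst l '0' (by assumption)
    have h0 := count_repFirst_of_mem l '0' (by decide) hm
    have hc : 1 ≤ l.count 'X' := List.count_pos_iff.mpr hm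
    omega

def make_sub_masks_alt (mask : String) : List String :=
  (msmB mask.toList).map String.ofList

-- ===== PRECONDITION & SPEC =====
def Spec_make_sub_masks (mask : String) (out : List String) : Prop := out = make_sub_masks_alt mask
instance (mask : String) (out : List String) : Decidable (Spec_make_sub_masks mask out) := by unfold Spec_make_sub_masks; infer_instance

-- ===== CLAIM (what is proved, stated in full; the proofs are below) =====
def Claim_equal_make_sub_masks : Prop := ∀ (mask : String), Dom_make_sub_masks mask → Spec_make_sub_masks mask (make_sub_masks mask)

-- ===== LEMMAS AND PROOFS =====

-- one-step unfolding of msmB (zeta-reduced form of its defining equation)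
theorem msmB_eq (m : List Char) : msmB m =
    if (repFirst m 'X' '0').contains 'X' = true
    then msmB (repFirst m 'X' '1') ++ msmB (repFirst m 'X' '0')
    else [repFirst m 'X' '0', repFirst m 'X' '1'] := by
  rw [msmB.eq_def]

-- the stack loop produces clean ++ the concatenation of B's results over the stack, top first
theorem msmLoopA_eq (dirty : List (List Char)) (clean : List (List Char)) :
    msmLoopA dirty clean = clean ++ dirty.flatMap msmB := by
  induction dirty, clean using msmLoopA.induct with
  | case1 clean => simp [msmLoopA]
  | case2 clean m rest a b h ih =>
    have h' : (repFirst m 'X' '0').contains 'X' = true := h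
    have ih' : msmLoopA (repFirst m 'X' '1' :: repFirst m 'X' '0' :: rest) clean
        = clean ++ List.flatMap msmB (repFirst m 'X' '1' :: repFirst m 'X' '0' :: rest) := ih
    rw [msmLoopA, if_pos h', ih']
    simp only [List.flatMap_cons]
    rw [msmB_eq m]
    simp only [List.contains_iff_mem] at h'
    simp [h']
  | case3 clean m rest a b h ih =>
    have h' : ¬ (repFirst m 'X' '0').contains 'X' = true := h
    have ih' : msmLoopA rest (clean ++ [repFirst m 'X' '0', repFirst m 'X' '1'])
        = (clean ++ [repFirst m 'X' '0', repFirst m 'X' '1']) ++ List.flatMap msmB rest := ih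
    rw [msmLoopA, if_neg h', ih']
    simp only [List.flatMap_cons]
    rw [msmB_eq m]
    simp only [List.contains_iff_mem] at h'
    simp [h']

-- ===== VERDICT (by name: the statement is the Claim_ definition above) =====
theorem make_sub_masks_spec : Claim_equal_make_sub_masks := by
  intro mask _
  unfold Spec_make_sub_masks make_sub_masks make_sub_masks_alt
  rw [msmLoopA_eq]
  simp
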